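-- pv_equiv track=rewrite | github.com/AursuleseiStefan/Aursulesei_Stefan_Python_3A6 | Lab2/p9.py | spectatori
-- ===== SOURCE A (Python) =====
-- def spectatori(matrice):
--   listaTuple=list()
--   for i in range(0,len(matrice[0])):
--     for j in range (len(matrice)-1,0,-1):#-1 bcz merge invers
--       ok=False
--       for k in range(j-1,-1,-1):
--         if(matrice[j][i]<=matrice[k][i]):
--           tuplu=(j,i)
--           listaTuple.append(tuplu)
--           break
--   return listaTuple
-- ===== SOURCE B (Python) =====
-- def spectatori(matrice):
--     rezultat = []
--     for i in range(len(matrice[0])):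
--         maxim = matrice[0][i]
--         coloana = []
--         for j in range(1, len(matrice)):
--             v = matrice[j][i]
--             if v <= maxim:
--                 coloana.append((j, i))
--             else:
--                 maxim = v
--             # (when v > maxim the new prefix max is v; when v <= maxim it is unchanged)
--         rezultat.extend(reversed(coloana))
--     return rezultat
-- ===== Notes on version B (the rewrite author's own statement) =====
-- stated objective: faster
-- what changed: B keeps a per-column running prefix maximum and compares each cell against it in one downward pass (collecting per column and reversing), instead of A's rescan of all rows above every cell.
import Mathlib
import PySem

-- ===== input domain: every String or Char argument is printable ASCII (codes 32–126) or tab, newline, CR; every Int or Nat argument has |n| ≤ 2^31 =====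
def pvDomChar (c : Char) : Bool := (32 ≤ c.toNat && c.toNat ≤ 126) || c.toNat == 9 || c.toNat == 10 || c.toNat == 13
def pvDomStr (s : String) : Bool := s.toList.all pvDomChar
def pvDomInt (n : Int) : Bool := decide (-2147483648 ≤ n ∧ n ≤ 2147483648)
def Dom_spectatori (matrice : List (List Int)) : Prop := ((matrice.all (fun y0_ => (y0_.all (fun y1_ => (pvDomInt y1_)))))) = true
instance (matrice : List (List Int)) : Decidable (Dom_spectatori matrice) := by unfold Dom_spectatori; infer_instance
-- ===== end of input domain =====

-- B replaces A's rescan of all rows above each cell by a per-column running prefix maximum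
-- (one pass per column instead of a quadratic rescan); return values proved equal on Pre_.

-- ===== PORT A =====
-- pyGetD is exact here: Pre_spectatori puts every accessed index in range.
def spectatori (matrice : List (List Int)) : List (Int × Int) :=
  (PySem.List.pyRange 0 ((PySem.List.pyGetD matrice 0 []).length : Int) 1).foldl
    (fun listaTuple i =>
      (PySem.List.pyRange ((matrice.length : Int) - 1) 0 (-1)).foldl
        (fun acc j =>
          -- 'for k in range(j-1,-1,-1): if …: append; break' appends (j,i) iff some k passes the test
          if ((PySem.List.pyRange (j - 1) (-1) (-1)).find?
              (fun k => decide (PySem.List.pyGetD (PySem.List.pyGetD matrice j []) i 0 ≤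
                                PySem.List.pyGetD (PySem.List.pyGetD matrice k []) i 0))).isSome
          then acc ++ [(j, i)] else acc)
        listaTuple)
    []

-- ===== PORT B =====
def spectatori_alt (matrice : List (List Int)) : List (Int × Int) :=
  (PySem.List.pyRange 0 ((PySem.List.pyGetD matrice 0 []).length : Int) 1).foldl
    (fun rezultat i =>
      let st :=
        (PySem.List.pyRange 1 (matrice.length : Int) 1).foldl
          (fun (st : Int × List (Int × Int)) j =>
            let v := PySem.List.pyGetD (PySem.List.pyGetD matrice j []) i 0
            if v ≤ st.1 then (st.1, st.2 ++ [(j, i)]) else (v, st.2))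
          (PySem.List.pyGetD (PySem.List.pyGetD matrice 0 []) i 0, [])
      rezultat ++ st.2.reverse)
    []

-- ===== PRECONDITION & SPEC =====
-- Pre_ excludes exactly the inputs where the Python raises IndexError: the empty matrix
-- (matrice[0]) and matrices with a row shorter than row 0 (matrice[j][i]).
def Pre_spectatori (matrice : List (List Int)) : Prop :=
  matrice ≠ [] ∧ ∀ row ∈ matrice, (matrice.headD []).length ≤ row.length

instance (matrice : List (List Int)) : Decidable (Pre_spectatori matrice) := by
  unfold Pre_spectatori; infer_instance

def pvWitness_spectatori : List (List Int) := [[1, 2], [3, 0], [1, 2]]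

def Spec_spectatori (matrice : List (List Int)) (out : List (Int × Int)) : Prop := out = spectatori_alt matrice
instance (matrice : List (List Int)) (out : List (Int × Int)) : Decidable (Spec_spectatori matrice out) := by unfold Spec_spectatori; infer_instance

-- ===== CLAIM (what is proved, stated in full; the proofs are below) =====
def Claim_equal_spectatori : Prop := ∀ (matrice : List (List Int)), Dom_spectatori matrice → Pre_spectatori matrice → Spec_spectatori matrice (spectatori matrice)

-- ===== LEMMAS AND PROOFS =====

-- the column reader both ports use
def pvCol (matrice : List (List Int)) (i j : Int) : Int :=
  PySem.List.pyGetD (PySem.List.pyGetD matrice j []) i 0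

-- prefix maximum of g over 0‥j-1
def pvPMax (g : Int → Int) (j : Int) : Int :=
  (PySem.List.pyRange 1 j 1).foldl (fun a t => max a (g t)) (g 0)

theorem pvCol_def (matrice : List (List Int)) (i j : Int) :
    PySem.List.pyGetD (PySem.List.pyGetD matrice j []) i 0 = pvCol matrice i j := rfl

theorem pvPMax_succ (g : Int → Int) (m : Int) (h : 1 ≤ m) :
    pvPMax g (m + 1) = max (pvPMax g m) (g m) := by
  unfold pvPMax
  rw [PySem.List.pyRange_one_succ_right h, List.foldl_append]
  rfl

-- A's inner k-scan fires exactly when the cell is ≤ the prefix maximum of its column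
theorem pvFind_eq_pmax (g : Int → Int) (j : Int) (hj : 1 ≤ j) :
    ((PySem.List.pyRange (j - 1) (-1) (-1)).find? (fun k => decide (g j ≤ g k))).isSome
      = decide (g j ≤ pvPMax g j) := by
  by_cases hle : g j ≤ pvPMax g j
  · rw [decide_eq_true hle, List.find?_isSome]
    have hmem : pvPMax g j = g 0 ∨ pvPMax g j ∈ (PySem.List.pyRange 1 j 1).map g := by
      unfold pvPMax
      rw [← List.foldl_map]
      exact PySem.List.foldl_max_mem _ _
    rcases hmem with hm | hm
    · exact ⟨0, by rw [PySem.List.mem_pyRange_neg_one]; omega, by simp; omega⟩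
    · obtain ⟨k, hk, hgk⟩ := List.mem_map.mp hm
      rw [PySem.List.mem_pyRange_one] at hk
      exact ⟨k, by rw [PySem.List.mem_pyRange_neg_one]; omega, by simp; omega⟩
  · rw [decide_eq_false hle, Bool.eq_false_iff]
    intro hs
    rw [List.find?_isSome] at hs
    obtain ⟨k, hk, hgk⟩ := hs
    rw [PySem.List.mem_pyRange_neg_one] at hk
    simp only [decide_eq_true_eq] at hgk
    apply hle
    have hkm : g k ≤ pvPMax g j := by
      unfold pvPMax
      rw [← List.foldl_map]
      rcases eq_or_lt_of_le (show (0:Int) ≤ k by omega) with hk0 | hk0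
      · have := (PySem.List.le_foldl_max ((PySem.List.pyRange 1 j 1).map g) (g 0)).1
        rw [← hk0]; exact this
      · have hmem : g k ∈ (PySem.List.pyRange 1 j 1).map g := by
          apply List.mem_map_of_mem
          rw [PySem.List.mem_pyRange_one]; omega
        exact (PySem.List.le_foldl_max ((PySem.List.pyRange 1 j 1).map g) (g 0)).2 _ hmem
    omega

-- A's inner j-loop, closed form
theorem pvA_inner (g : Int → Int) (n i : Int) (acc : List (Int × Int)) :
    (PySem.List.pyRange (n - 1) 0 (-1)).foldl
        (fun acc j =>
          if ((PySem.List.pyRange (j - 1) (-1) (-1)).find? (fun k => decide (g j ≤ g k))).isSome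
          then acc ++ [(j, i)] else acc) acc
      = acc ++ (((PySem.List.pyRange 1 n 1).filter
          (fun j => ((PySem.List.pyRange (j - 1) (-1) (-1)).find? (fun k => decide (g j ≤ g k))).isSome)).map
            (fun j => (j, i))).reverse := by
  rw [PySem.List.foldl_append_if]
  have hrev : PySem.List.pyRange (n - 1) 0 (-1) = (PySem.List.pyRange 1 n 1).reverse := by
    have := PySem.List.pyRange_neg_one_eq_reverse (n - 1) 0
    simpa using this
  rw [hrev, List.filter_reverse, List.map_reverse]

-- B's inner j-loop invariant: the state is (prefix max, cells ≤ their prefix max, ascending)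
theorem pvB_inner (g : Int → Int) (i : Int) (n : Nat) :
    (PySem.List.pyRange 1 (n : Int) 1).foldl
        (fun (st : Int × List (Int × Int)) j =>
          if g j ≤ st.1 then (st.1, st.2 ++ [(j, i)]) else (g j, st.2)) (g 0, [])
      = (pvPMax g n,
         ((PySem.List.pyRange 1 (n : Int) 1).filter (fun j => decide (g j ≤ pvPMax g j))).map
           (fun j => (j, i))) := by
  induction n with
  | zero => simp [pvPMax, PySem.List.pyRange_one_eq_nil]
  | succ m ih =>
    rcases Nat.eq_zero_or_pos m with hm | hm
    · subst hm
      have h1 : PySem.List.pyRange 1 ((1 : Nat) : Int) 1 = [] :=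
        PySem.List.pyRange_one_eq_nil (by norm_num)
      simp [pvPMax]
    · have hm1 : (1 : Int) ≤ (m : Int) := by exact_mod_cast hm
      have hcast : ((m + 1 : Nat) : Int) = (m : Int) + 1 := by push_cast; ring
      rw [hcast, PySem.List.pyRange_one_succ_right hm1, List.foldl_append, ih,
        List.filter_append, List.map_append, pvPMax_succ g (m : Int) hm1]
      simp only [List.foldl_cons, List.foldl_nil, List.filter_cons, List.filter_nil]
      by_cases hle : g (m : Int) ≤ pvPMax g (m : Int)
      · rw [if_pos hle, max_eq_left hle]
        simp [hle]
      · rw [if_neg hle, max_eq_right ((not_le.mp hle).le)]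
        simp [hle]

-- ===== VERDICT (by name: the statement is the Claim_ definition above) =====
theorem spectatori_spec : Claim_equal_spectatori := by
  intro matrice _ _
  unfold Spec_spectatori spectatori spectatori_alt
  apply PySem.List.foldl_congr_mem
  intro acc i _
  simp only [pvCol_def]
  refine (pvA_inner (pvCol matrice i) (matrice.length : Int) i acc).trans ?_
  have hfil : ((PySem.List.pyRange 1 (matrice.length : Int) 1).filter
        (fun j => ((PySem.List.pyRange (j - 1) (-1) (-1)).find?
          (fun k => decide (pvCol matrice i j ≤ pvCol matrice i k))).isSome))
      = ((PySem.List.pyRange 1 (matrice.length : Int) 1).filter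
        (fun j => decide (pvCol matrice i j ≤ pvPMax (pvCol matrice i) j))) := by
    apply List.filter_congr
    intro j hj
    rw [PySem.List.mem_pyRange_one] at hj
    exact pvFind_eq_pmax (pvCol matrice i) j hj.1
  rw [hfil]
  exact (congrArg (fun l : Int × List (Int × Int) => acc ++ l.2.reverse)
    (pvB_inner (pvCol matrice i) i matrice.length)).symm
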